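-- pv_equiv track=rewrite | github.com/sueszli/vector-database-benchmark | dataset/python-mutated/dis.py | pretty_flags
-- ===== SOURCE A (Python) =====
-- COMPILER_FLAG_NAMES = {1: 'OPTIMIZED', 2: 'NEWLOCALS', 4: 'VARARGS', 8: 'VARKEYWORDS', 16: 'NESTED', 32: 'GENERATOR', 64: 'NOFREE', 128: 'COROUTINE', 256: 'ITERABLE_COROUTINE', 512: 'ASYNC_GENERATOR', 1073741824: 'SUPPRESS_JIT'}
--
-- def pretty_flags(flags):
--     if False:
--         while True:
--             i = 10
--     'Return pretty representation of code flags.'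
--     names = []
--     for i in range(32):
--         flag = 1 << i
--         if flags & flag:
--             names.append(COMPILER_FLAG_NAMES.get(flag, hex(flag)))
--             flags ^= flag
--             if not flags:
--                 break
--     else:
--         names.append(hex(flags))
--     return ', '.join(names)
-- ===== SOURCE B (Python) =====
-- COMPILER_FLAG_NAMES = {1: 'OPTIMIZED', 2: 'NEWLOCALS', 4: 'VARARGS', 8: 'VARKEYWORDS', 16: 'NESTED', 32: 'GENERATOR', 64: 'NOFREE', 128: 'COROUTINE', 256: 'ITERABLE_COROUTINE', 512: 'ASYNC_GENERATOR', 1073741824: 'SUPPRESS_JIT'}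
--
-- def pretty_flags(flags):
--     'Return pretty representation of code flags.'
--     low = flags & 0xFFFFFFFF
--     names = []
--     while low:
--         bit = low & -low
--         names.append(COMPILER_FLAG_NAMES.get(bit, hex(bit)))
--         low ^= bit
--     rem = flags & ~0xFFFFFFFF
--     if rem or not names:
--         names.append(hex(rem))
--     return ', '.join(names)
-- ===== Notes on version B (the rewrite author's own statement) =====
-- stated objective: idiomatic
-- what changed: A scans all 32 bit positions while mutating flags with xor, break and a for-else; B masks the low 32-bit word once and walks only the set bits with the bit = low & -low idiom, then appends hex of the explicit high-bit remainder when it is nonzero or no names were collected.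
import Mathlib
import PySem

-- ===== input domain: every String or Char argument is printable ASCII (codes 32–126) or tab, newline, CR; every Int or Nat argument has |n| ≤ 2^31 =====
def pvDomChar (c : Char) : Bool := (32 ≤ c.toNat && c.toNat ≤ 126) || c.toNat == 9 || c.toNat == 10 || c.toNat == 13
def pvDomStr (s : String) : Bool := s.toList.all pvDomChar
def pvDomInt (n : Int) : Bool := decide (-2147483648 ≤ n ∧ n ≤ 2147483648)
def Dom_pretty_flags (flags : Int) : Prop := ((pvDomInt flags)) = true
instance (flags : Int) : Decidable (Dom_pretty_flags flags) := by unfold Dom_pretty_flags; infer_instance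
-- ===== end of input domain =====

-- B replaces A's stateful scan of all 32 bit positions (with xor-clearing, break and
-- for-else) by the `bit = low & -low` set-bit traversal of the masked low word plus an
-- explicit high-bit remainder; same return value on the whole domain (objective: idiomatic).

-- ===== PORT A =====

-- exact port of Python's hex(): lowercase digits, "0x" prefix, "-" sign for negatives
def hexNat (n : Nat) : String := "0x" ++ String.ofList (Nat.toDigits 16 n)

def hexStr (v : Int) : String := if v < 0 then "-" ++ hexNat (-v).toNat else hexNat v.toNat

def COMPILER_FLAG_NAMES : PySem.Dict Int String := PySem.Dict.ofList
  [(1, "OPTIMIZED"), (2, "NEWLOCALS"), (4, "VARARGS"), (8, "VARKEYWORDS"), (16, "NESTED"),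
   (32, "GENERATOR"), (64, "NOFREE"), (128, "COROUTINE"), (256, "ITERABLE_COROUTINE"),
   (512, "ASYNC_GENERATOR"), (1073741824, "SUPPRESS_JIT")]

-- A's `for i in range(32): … else: names.append(hex(flags))`; the nil case is the for-else
def prettyLoopA : List Int → Int → List String → List String
  | [], flags, names => names ++ [hexStr flags]
  | i :: rest, flags, names =>
    let flag : Int := 1 <<< i.toNat   -- i ∈ range(32) is a nonnegative shift amount
    if PySem.Int.band flags flag ≠ 0 then
      let names' := names ++ [COMPILER_FLAG_NAMES.getD flag (hexStr flag)]
      let flags' := PySem.Int.bxor flags flag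
      if flags' = 0 then names' else prettyLoopA rest flags' names'
    else prettyLoopA rest flags names

def pretty_flags (flags : Int) : String :=
  PySem.Str.join ", " (prettyLoopA (PySem.List.pyRange 0 32 1) flags [])

-- ===== PORT B =====

-- B's `while low: bit = low & -low; …; low ^= bit`; `fuel` only bounds the iteration
-- count for totality (each step strictly decreases low, so low.toNat + 1 suffices),
-- and the `low ≤ 0` test is Python's `while low:` on the nonnegative masked word
def prettyLoopB : Nat → Int → List String → List String
  | 0, _, names => names
  | fuel + 1, low, names =>
    if low ≤ 0 then names
    else
      let bit := PySem.Int.band low (-low)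
      prettyLoopB fuel (PySem.Int.bxor low bit)
        (names ++ [COMPILER_FLAG_NAMES.getD bit (hexStr bit)])

def pretty_flags_alt (flags : Int) : String :=
  let low := PySem.Int.band flags 4294967295
  let names := prettyLoopB (low.toNat + 1) low []
  let rem := PySem.Int.band flags (Int.not 4294967295)
  let names := if rem ≠ 0 ∨ names = [] then names ++ [hexStr rem] else names
  PySem.Str.join ", " names

-- ===== PRECONDITION & SPEC =====
def Spec_pretty_flags (flags : Int) (out : String) : Prop := out = pretty_flags_alt flags
instance (flags : Int) (out : String) : Decidable (Spec_pretty_flags flags out) := by unfold Spec_pretty_flags; infer_instance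

-- ===== CLAIM (what is proved, stated in full; the proofs are below) =====
def Claim_equal_pretty_flags : Prop := ∀ (flags : Int), Dom_pretty_flags flags → Spec_pretty_flags flags (pretty_flags flags)

-- ===== LEMMAS AND PROOFS =====

-- ascending list of the exponents of the set bits of n
def lowBits (n : Nat) : List Nat :=
  if h : n = 0 then []
  else (if n % 2 = 1 then [0] else []) ++ (lowBits (n / 2)).map (· + 1)
  termination_by n
  decreasing_by exact Nat.div_lt_self (Nat.pos_of_ne_zero h) (by norm_num)

-- the string both programs emit for the single flag value 2^e
def flagRepr (e : Nat) : String :=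
  COMPILER_FLAG_NAMES.getD ((2 : Int) ^ e) (hexStr ((2 : Int) ^ e))

theorem lowBits_zero : lowBits 0 = [] := by rw [lowBits]; simp

theorem lowBits_even (n : Nat) (h0 : n ≠ 0) (he : n % 2 = 0) :
    lowBits n = (lowBits (n / 2)).map (· + 1) := by
  rw [lowBits]; simp [h0, he]

theorem lowBits_odd (n : Nat) (ho : n % 2 = 1) :
    lowBits n = 0 :: (lowBits (n / 2)).map (· + 1) := by
  have h0 : n ≠ 0 := by omega
  rw [lowBits]; simp [h0, ho]

theorem lowBits_eq_nil_iff (n : Nat) : lowBits n = [] ↔ n = 0 := by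
  induction n using Nat.strong_induction_on with
  | _ n ih =>
    by_cases h0 : n = 0
    · simp [h0, lowBits_zero]
    · by_cases ho : n % 2 = 1
      · rw [lowBits_odd n ho]; simp [h0]
      · rw [lowBits_even n h0 (by omega)]
        simp only [List.map_eq_nil_iff, ih (n / 2) (by omega)]
        omega

-- bit-arithmetic facts about the lowest set bit
theorem pvTbSuccOdd (d : Nat) (hd : d % 2 = 1) (i : Nat) :
    d.testBit (i + 1) = (d - 1).testBit (i + 1) := by
  rw [Nat.testBit_add_one, Nat.testBit_add_one]
  congr 1; omega

theorem pvTbPowMul (k d j : Nat) :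
    (2 ^ k * d).testBit j = (decide (k ≤ j) && d.testBit (j - k)) := by
  rw [mul_comm, Nat.testBit_mul_two_pow]

theorem pvTbPowMulSubOne (k d j : Nat) (hd : 0 < d) :
    (2 ^ k * d - 1).testBit j = if j < k then true else (d - 1).testBit (j - k) := by
  have hlt : 2 ^ k - 1 < 2 ^ k := by have := Nat.two_pow_pos k; omega
  have hdec : 2 ^ k * d - 1 = 2 ^ k * (d - 1) + (2 ^ k - 1) := by
    have := Nat.two_pow_pos k
    have hle : 2 ^ k * 1 ≤ 2 ^ k * d := Nat.mul_le_mul_left _ (by omega)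
    rw [Nat.mul_sub]; omega
  rw [hdec, Nat.testBit_two_pow_mul_add (d - 1) hlt j]
  split
  · next h => simp [Nat.testBit_two_pow_sub_one, h]
  · rfl

theorem pvAndPred (k d : Nat) (hd : d % 2 = 1) :
    (2 ^ k * d) &&& (2 ^ k * d - 1) = 2 ^ k * (d - 1) := by
  apply Nat.eq_of_testBit_eq
  intro j
  rw [Nat.testBit_and, pvTbPowMul, pvTbPowMulSubOne k d j (by omega), pvTbPowMul]
  by_cases h : k ≤ j
  · simp only [h, decide_true, Bool.true_and, if_neg (by omega : ¬ j < k)]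
    rcases Nat.lt_or_ge k j with h' | h'
    · obtain ⟨i, hi⟩ : ∃ i, j - k = i + 1 := ⟨j - k - 1, by omega⟩
      rw [hi, pvTbSuccOdd d hd i, Bool.and_self]
    · have hjk : j = k := by omega
      subst hjk
      simp [Nat.testBit_zero, hd, (by omega : (d - 1) % 2 = 0)]
  · simp [h, if_pos (by omega : j < k)]

theorem pvXorLowbit (k d : Nat) (hd : d % 2 = 1) :
    (2 ^ k * d) ^^^ 2 ^ k = 2 ^ k * (d - 1) := by
  apply Nat.eq_of_testBit_eq
  intro j
  rw [Nat.testBit_xor, pvTbPowMul, Nat.testBit_two_pow, pvTbPowMul]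
  by_cases h : k ≤ j
  · rcases Nat.lt_or_ge k j with h' | h'
    · obtain ⟨i, hi⟩ : ∃ i, j - k = i + 1 := ⟨j - k - 1, by omega⟩
      simp [h, (show ¬ k = j by omega), hi, pvTbSuccOdd d hd i]
    · have hjk : j = k := by omega
      subst hjk
      simp [Nat.testBit_zero, hd, (by omega : (d - 1) % 2 = 0)]
  · simp [h, (show ¬ k = j by omega)]

theorem pvMulHalf (k d : Nat) (hd : d % 2 = 1) : 2 ^ k * (d - 1) = 2 ^ (k + 1) * (d / 2) := by
  have : d - 1 = 2 * (d / 2) := by omega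
  rw [this, pow_succ]; ring

theorem pvBandPosNeg (n : Nat) (hn : 0 < n) :
    PySem.Int.band (n : Int) (-(n : Int)) = ((n - (n &&& (n - 1)) : Nat) : Int) := by
  have h1 : ¬ (0 : Int) ≤ -(n : Int) := by omega
  unfold PySem.Int.band
  rw [if_pos (Int.natCast_nonneg n), if_neg h1]
  have e2 : (- -(n : Int) - 1).toNat = n - 1 := by omega
  rw [Int.toNat_natCast, e2]

theorem pvLowbitEq (k d : Nat) (hd : d % 2 = 1) :
    PySem.Int.band ((2 ^ k * d : Nat) : Int) (-((2 ^ k * d : Nat) : Int)) = ((2 ^ k : Nat) : Int) := by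
  have hpos : 0 < 2 ^ k * d := Nat.mul_pos (Nat.two_pow_pos k) (by omega)
  rw [pvBandPosNeg _ hpos, pvAndPred k d hd]
  congr 1
  have := Nat.two_pow_pos k
  have hle : 2 ^ k * 1 ≤ 2 ^ k * d := Nat.mul_le_mul_left _ (by omega)
  rw [Nat.mul_sub]; omega

theorem pvBxorStep (k d : Nat) (hd : d % 2 = 1) :
    PySem.Int.bxor ((2 ^ k * d : Nat) : Int) ((2 ^ k : Nat) : Int) = ((2 ^ (k + 1) * (d / 2) : Nat) : Int) := by
  rw [PySem.Int.bxor_natCast, pvXorLowbit k d hd, pvMulHalf k d hd]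

theorem castPow (i : Nat) : ((2 ^ i : Nat) : Int) = (2 : Int) ^ i := by push_cast; ring

theorem mapShift (l : List Nat) (k : Nat) :
    (l.map (· + 1)).map (fun j => flagRepr (j + k)) = l.map (fun j => flagRepr (j + (k + 1))) := by
  rw [List.map_map]
  apply List.map_congr_left
  intro j _
  simp only [Function.comp_apply]
  congr 1
  omega

-- B's loop on 2^k·n yields the flag strings of n's set bits, shifted by k
theorem loopB_eq (n : Nat) : ∀ (k fuel : Nat) (names : List String), n ≤ fuel →
    prettyLoopB fuel ((2 ^ k * n : Nat) : Int) names
      = names ++ (lowBits n).map (fun j => flagRepr (j + k)) := by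
  induction n using Nat.strong_induction_on with
  | _ n ih =>
    intro k fuel names hfuel
    by_cases h0 : n = 0
    · subst h0
      cases fuel <;> simp [prettyLoopB, lowBits_zero]
    · by_cases ho : n % 2 = 1
      · have hpos : 0 < 2 ^ k * n := Nat.mul_pos (Nat.two_pow_pos k) (by omega)
        obtain ⟨f, rfl⟩ : ∃ f, fuel = f + 1 := ⟨fuel - 1, by omega⟩
        show (if ((2 ^ k * n : Nat) : Int) ≤ 0 then names else _) = _
        rw [if_neg (by omega : ¬ ((2 ^ k * n : Nat) : Int) ≤ 0)]
        simp only [pvLowbitEq k n ho, pvBxorStep k n ho]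
        rw [ih (n / 2) (by omega) (k + 1) f _ (by omega)]
        rw [lowBits_odd n ho, castPow k]
        have hrepr : COMPILER_FLAG_NAMES.getD ((2 : Int) ^ k) (hexStr ((2 : Int) ^ k))
            = flagRepr k := rfl
        rw [hrepr, List.map_cons, mapShift]
        simp
      · have h2 : 2 ^ k * n = 2 ^ (k + 1) * (n / 2) := by
          have hn2 : n = 2 * (n / 2) := by omega
          conv_lhs => rw [hn2]
          rw [pow_succ]; ring
        rw [h2, ih (n / 2) (by omega) (k + 1) fuel names (by omega),
          lowBits_even n h0 (by omega), mapShift]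

-- evaluation of A's bit test and bit clear on flags 2^32·hh + 2^i·m, hh ∈ {0, -1}
theorem pvBandStepA (i c m : Nat) (hh : Int) (hic : i + (c + 1) = 32) (hm : m < 2 ^ (c + 1))
    (hh01 : hh = 0 ∨ hh = -1) :
    PySem.Int.band ((2 : Int) ^ 32 * hh + (2 : Int) ^ i * (m : Int)) ((2 : Int) ^ i)
      = if m % 2 = 1 then (2 : Int) ^ i else 0 := by
  have hmul : 2 ^ i * 2 ^ (c + 1) = 2 ^ 32 := by
    have h' : i + (c + 1) = 32 := by omega
    rw [← pow_add, h']
  have hlt : 2 ^ i * m < 2 ^ 32 := by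
    calc 2 ^ i * m < 2 ^ i * 2 ^ (c + 1) := Nat.mul_lt_mul_of_pos_left hm (Nat.two_pow_pos i)
      _ = 2 ^ 32 := hmul
  rcases hh01 with rfl | rfl
  · have he : (2 : Int) ^ 32 * 0 + (2 : Int) ^ i * (m : Int) = ((2 ^ i * m : Nat) : Int) := by
      push_cast; ring
    rw [he, ← castPow i, PySem.Int.band_natCast, Nat.and_two_pow, pvTbPowMul]
    simp only [Nat.sub_self, Nat.testBit_zero, le_refl, decide_true, Bool.true_and]
    by_cases hp : m % 2 = 1
    · simp [hp]
    · simp [hp]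
  · -- hh = -1 : the flags value is negative
    have hfneg : ¬ (0 : Int) ≤ (2 : Int) ^ 32 * (-1) + (2 : Int) ^ i * (m : Int) := by
      have h32 : ((2 ^ 32 : Nat) : Int) = (2 : Int) ^ 32 := castPow 32
      have hmc : ((2 ^ i * m : Nat) : Int) = (2 : Int) ^ i * (m : Int) := by push_cast; ring
      omega
    unfold PySem.Int.band
    rw [if_neg hfneg, if_pos (by positivity : (0 : Int) ≤ (2 : Int) ^ i)]
    have h32 : ((2 ^ 32 : Nat) : Int) = (2 : Int) ^ 32 := castPow 32
    have hmc : ((2 ^ i * m : Nat) : Int) = (2 : Int) ^ i * (m : Int) := by push_cast; ring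
    have htn : (-((2 : Int) ^ 32 * (-1) + (2 : Int) ^ i * (m : Int)) - 1).toNat
        = 2 ^ 32 - 2 ^ i * m - 1 := by omega
    have hitn : ((2 : Int) ^ i).toNat = 2 ^ i := by
      rw [← castPow i, Int.toNat_natCast]
    rw [htn, hitn]
    have hx : 2 ^ 32 - 2 ^ i * m - 1 = 2 ^ i * (2 ^ (c + 1) - m) - 1 := by
      rw [Nat.mul_sub, hmul]
    have heven : 2 ^ (c + 1) % 2 = 0 := by
      rw [pow_succ]; omega
    rw [hx, Nat.two_pow_and, pvTbPowMulSubOne i (2 ^ (c + 1) - m) i (by omega),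
      if_neg (by omega : ¬ i < i), Nat.sub_self, Nat.testBit_zero]
    by_cases hp : m % 2 = 1
    · rw [if_pos hp]
      have hP : ¬ ((2 ^ (c + 1) - m - 1) % 2 = 1) := by omega
      simp [hP]
    · rw [if_neg hp]
      have hP : (2 ^ (c + 1) - m - 1) % 2 = 1 := by omega
      simp [hP]

theorem pvXorHigh (i e : Nat) (he : e % 2 = 1) :
    (2 ^ i * e - 1) ^^^ 2 ^ i = 2 ^ i * (e + 1) - 1 := by
  apply Nat.eq_of_testBit_eq
  intro j
  rw [Nat.testBit_xor, pvTbPowMulSubOne i e j (by omega),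
    pvTbPowMulSubOne i (e + 1) j (by omega), Nat.testBit_two_pow]
  by_cases h : j < i
  · simp [h, (show ¬ i = j by omega)]
  · rw [if_neg h, if_neg h]
    rcases Nat.lt_or_ge i j with h' | h'
    · obtain ⟨t, ht⟩ : ∃ t, j - i = t + 1 := ⟨j - i - 1, by omega⟩
      rw [ht, ← pvTbSuccOdd e he t]
      simp [(show ¬ i = j by omega)]
    · have hji : j = i := by omega
      subst hji
      simp [Nat.testBit_zero, (show (e - 1) % 2 = 0 by omega), he]

theorem pvBxorStepA (i c m : Nat) (hh : Int) (hic : i + (c + 1) = 32) (hm : m < 2 ^ (c + 1))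
    (hh01 : hh = 0 ∨ hh = -1) (ho : m % 2 = 1) :
    PySem.Int.bxor ((2 : Int) ^ 32 * hh + (2 : Int) ^ i * (m : Int)) ((2 : Int) ^ i)
      = (2 : Int) ^ 32 * hh + ((2 ^ (i + 1) * (m / 2) : Nat) : Int) := by
  have hmul : 2 ^ i * 2 ^ (c + 1) = 2 ^ 32 := by
    have h' : i + (c + 1) = 32 := by omega
    rw [← pow_add, h']
  rcases hh01 with rfl | rfl
  · have he : (2 : Int) ^ 32 * 0 + (2 : Int) ^ i * (m : Int) = ((2 ^ i * m : Nat) : Int) := by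
      push_cast; ring
    rw [he, ← castPow i, pvBxorStep i m ho]
    simp
  · have hlt : 2 ^ i * m < 2 ^ 32 := by
      calc 2 ^ i * m < 2 ^ i * 2 ^ (c + 1) := Nat.mul_lt_mul_of_pos_left hm (Nat.two_pow_pos i)
        _ = 2 ^ 32 := hmul
    have h32 : ((2 ^ 32 : Nat) : Int) = (2 : Int) ^ 32 := castPow 32
    have hmc : ((2 ^ i * m : Nat) : Int) = (2 : Int) ^ i * (m : Int) := by push_cast; ring
    have hfneg : ¬ (0 : Int) ≤ (2 : Int) ^ 32 * (-1) + (2 : Int) ^ i * (m : Int) := by omega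
    unfold PySem.Int.bxor
    rw [if_neg hfneg, if_pos (by positivity : (0 : Int) ≤ (2 : Int) ^ i)]
    have htn : (-((2 : Int) ^ 32 * (-1) + (2 : Int) ^ i * (m : Int)) - 1).toNat
        = 2 ^ 32 - 2 ^ i * m - 1 := by omega
    have hitn : ((2 : Int) ^ i).toNat = 2 ^ i := by rw [← castPow i, Int.toNat_natCast]
    rw [htn, hitn]
    have heven : 2 ^ (c + 1) % 2 = 0 := by rw [pow_succ]; omega
    have hx : 2 ^ 32 - 2 ^ i * m - 1 = 2 ^ i * (2 ^ (c + 1) - m) - 1 := by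
      rw [Nat.mul_sub, hmul]
    have hxor := pvXorHigh i (2 ^ (c + 1) - m) (by omega)
    rw [hx, hxor]
    have hval : 2 ^ i * (2 ^ (c + 1) - m + 1) - 1 = 2 ^ 32 - 2 ^ (i + 1) * (m / 2) - 1 := by
      have hm2 : m = 2 * (m / 2) + 1 := by omega
      have hs : 2 ^ (i + 1) * (m / 2) = 2 ^ i * (2 * (m / 2)) := by rw [pow_succ]; ring
      rw [Nat.mul_add, Nat.mul_sub, hmul, hs, mul_one]
      have hQ : 2 ^ i * m = 2 ^ i * (2 * (m / 2)) + 2 ^ i := by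
        conv_lhs => rw [hm2]
        rw [Nat.mul_add, mul_one]
      omega
    rw [hval]
    have hrem : 2 ^ (i + 1) * (m / 2) < 2 ^ 32 := by
      calc 2 ^ (i + 1) * (m / 2) ≤ 2 ^ i * m := by
            rw [pow_succ, (show 2 ^ i * 2 * (m / 2) = 2 ^ i * (2 * (m / 2)) by ring)]
            exact Nat.mul_le_mul_left _ (by omega)
        _ < 2 ^ 32 := hlt
    have hc : ((2 ^ 32 - 2 ^ (i + 1) * (m / 2) - 1 : Nat) : Int)
        = (2 : Int) ^ 32 - ((2 ^ (i + 1) * (m / 2) : Nat) : Int) - 1 := by omega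
    omega

-- A's loop from position i (i + c = 32) on flags 2^32·hh + 2^i·m, hh ∈ {0, -1}
theorem loopA_eq (c : Nat) : ∀ (i m : Nat) (hh : Int) (names : List String),
    i + c = 32 → m < 2 ^ c → (hh = 0 ∨ hh = -1) →
    prettyLoopA ((List.range' i c).map Int.ofNat)
        ((2 : Int) ^ 32 * hh + (2 : Int) ^ i * (m : Int)) names
      = names ++ (lowBits m).map (fun j => flagRepr (j + i))
          ++ (if hh = 0 ∧ m ≠ 0 then [] else [hexStr ((2 : Int) ^ 32 * hh)]) := by
  induction c with
  | zero =>
    intro i m hh names hic hm hh01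
    have hm0 : m = 0 := by omega
    subst hm0
    simp [prettyLoopA, lowBits_zero]
  | succ c ihc =>
    intro i m hh names hic hm hh01
    have h2c : 2 ^ (c + 1) = 2 * 2 ^ c := by rw [pow_succ]; ring
    rw [List.range'_succ, List.map_cons]
    have hflag : ((1 <<< (Int.ofNat i).toNat : Nat) : Int) = (2 : Int) ^ i := by
      have h1 : (Int.ofNat i).toNat = i := rfl
      rw [h1, Nat.one_shiftLeft, castPow]
    simp only [prettyLoopA, hflag]
    rw [pvBandStepA i c m hh hic hm hh01]
    by_cases ho : m % 2 = 1
    · rw [if_pos ho]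
      have hne : ((2 : Int) ^ i ≠ 0) := by positivity
      rw [if_pos hne]
      rw [pvBxorStepA i c m hh hic hm hh01 ho]
      have hrepr : COMPILER_FLAG_NAMES.getD ((2 : Int) ^ i) (hexStr ((2 : Int) ^ i))
          = flagRepr i := rfl
      have hrem : 2 ^ (i + 1) * (m / 2) < 2 ^ 32 := by
        have hmul : 2 ^ (i + 1) * 2 ^ c = 2 ^ 32 := by
          have h' : i + 1 + c = 32 := by omega
          rw [← pow_add, h']
        calc 2 ^ (i + 1) * (m / 2) < 2 ^ (i + 1) * 2 ^ c :=
              Nat.mul_lt_mul_of_pos_left (by omega) (Nat.two_pow_pos (i + 1))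
          _ = 2 ^ 32 := hmul
      have h32 : ((2 ^ 32 : Nat) : Int) = (2 : Int) ^ 32 := castPow 32
      by_cases hbrk : hh = 0 ∧ m = 1
      · obtain ⟨rfl, rfl⟩ := hbrk
        rw [if_pos (by norm_num)]
        rw [lowBits_odd 1 (by norm_num)]
        simp [lowBits_zero, hrepr]
      · have hnz : ¬ ((2 : Int) ^ 32 * hh + ((2 ^ (i + 1) * (m / 2) : Nat) : Int) = 0) := by
          rcases hh01 with rfl | rfl
          · have : m / 2 ≠ 0 := by
              rcases Nat.eq_zero_or_pos (m / 2) with h | h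
              · exfalso; exact hbrk ⟨rfl, by omega⟩
              · omega
            have : 2 ^ (i + 1) * (m / 2) ≠ 0 :=
              Nat.mul_ne_zero (by positivity) this
            omega
          · omega
        rw [if_neg hnz]
        have hform : (2 : Int) ^ 32 * hh + ((2 ^ (i + 1) * (m / 2) : Nat) : Int)
            = (2 : Int) ^ 32 * hh + (2 : Int) ^ (i + 1) * ((m / 2 : Nat) : Int) := by
          push_cast; ring
        rw [hform, ihc (i + 1) (m / 2) hh _ (by omega) (by omega) hh01]
        have hcond : (hh = 0 ∧ m / 2 ≠ 0) = (hh = 0 ∧ m ≠ 0) := by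
          apply propext
          constructor
          · rintro ⟨rfl, hmz⟩; exact ⟨rfl, by omega⟩
          · rintro ⟨rfl, hmz⟩
            refine ⟨rfl, ?_⟩
            intro hq
            exact hbrk ⟨rfl, by omega⟩
        rw [lowBits_odd m ho, List.map_cons, mapShift]
        simp only [hrepr, List.append_assoc, List.cons_append, List.nil_append,
          Nat.zero_add, hcond]
    · rw [if_neg (by simp [ho] : ¬ (if m % 2 = 1 then (2 : Int) ^ i else 0) ≠ 0)]
      have hform : (2 : Int) ^ 32 * hh + (2 : Int) ^ i * (m : Int)
          = (2 : Int) ^ 32 * hh + (2 : Int) ^ (i + 1) * ((m / 2 : Nat) : Int) := by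
        have hm2 : (m : Int) = 2 * ((m / 2 : Nat) : Int) := by omega
        rw [hm2, pow_succ]; ring
      rw [hform, ihc (i + 1) (m / 2) hh _ (by omega) (by omega) hh01]
      by_cases hm0 : m = 0
      · subst hm0
        simp [lowBits_zero]
      · have hcond : (hh = 0 ∧ m / 2 ≠ 0) = (hh = 0 ∧ m ≠ 0) := by
          apply propext
          constructor
          · rintro ⟨rfl, hmz⟩; exact ⟨rfl, by omega⟩
          · rintro ⟨rfl, hmz⟩; exact ⟨rfl, by omega⟩
        rw [lowBits_even m hm0 (by omega), mapShift]
        simp only [hcond]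

theorem pvRangeEq : PySem.List.pyRange 0 32 1 = (List.range' 0 32).map Int.ofNat := by
  decide

theorem pvBandLowNonneg (m : Nat) (hm : m < 2 ^ 32) :
    PySem.Int.band ((m : Nat) : Int) 4294967295 = ((m : Nat) : Int) := by
  have : (4294967295 : Int) = ((4294967295 : Nat) : Int) := by norm_num
  rw [this, PySem.Int.band_natCast]
  congr 1
  have h1 : (4294967295 : Nat) = 2 ^ 32 - 1 := by norm_num
  rw [h1, Nat.and_two_pow_sub_one_eq_mod, Nat.mod_eq_of_lt hm]

theorem pvBandRemNonneg (m : Nat) (hm : m < 2 ^ 32) :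
    PySem.Int.band ((m : Nat) : Int) (Int.not 4294967295) = 0 := by
  have hnot : Int.not 4294967295 = -4294967296 := by decide
  rw [hnot]
  unfold PySem.Int.band
  rw [if_pos (Int.natCast_nonneg m), if_neg (by norm_num : ¬ (0 : Int) ≤ -4294967296)]
  have h2 : (-(-4294967296 : Int) - 1).toNat = 4294967295 := by decide
  rw [Int.toNat_natCast, h2]
  have h1 : (4294967295 : Nat) = 2 ^ 32 - 1 := by norm_num
  rw [h1, Nat.and_two_pow_sub_one_eq_mod, Nat.mod_eq_of_lt hm, Nat.sub_self]
  norm_num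

theorem pvOrMask (x : Nat) (hx : x < 2 ^ 32) : x ||| 4294967295 = 4294967295 := by
  apply Nat.eq_of_testBit_eq
  intro j
  have h1 : (4294967295 : Nat) = 2 ^ 32 - 1 := by norm_num
  rw [Nat.testBit_or, h1, Nat.testBit_two_pow_sub_one]
  by_cases h : j < 32
  · simp [h]
  · have hxb : x.testBit j = false := by
      apply Nat.testBit_lt_two_pow
      calc x < 2 ^ 32 := hx
        _ ≤ 2 ^ j := Nat.pow_le_pow_right (by norm_num) (by omega)
    simp [h, hxb]

theorem pvBandLowNeg (m : Nat) (hm : m < 2 ^ 32) :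
    PySem.Int.band ((2 : Int) ^ 32 * (-1) + (m : Int)) 4294967295 = ((m : Nat) : Int) := by
  set f : Int := (2 : Int) ^ 32 * (-1) + (m : Int) with hf
  have h32 : ((2 ^ 32 : Nat) : Int) = (2 : Int) ^ 32 := castPow 32
  have hfneg : ¬ (0 : Int) ≤ f := by omega
  unfold PySem.Int.band
  rw [if_neg hfneg, if_pos (by norm_num : (0 : Int) ≤ 4294967295)]
  have htn : (-f - 1).toNat = 2 ^ 32 - m - 1 := by omega
  have htb : (4294967295 : Int).toNat = 4294967295 := by decide
  rw [htn, htb]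
  congr 1
  have h1 : (4294967295 : Nat) = 2 ^ 32 - 1 := by norm_num
  have hlt : 2 ^ 32 - m - 1 < 2 ^ 32 := by omega
  rw [(Nat.and_comm _ _ : 4294967295 &&& (2 ^ 32 - m - 1) = (2 ^ 32 - m - 1) &&& 4294967295)]
  rw [h1, Nat.and_two_pow_sub_one_eq_mod, Nat.mod_eq_of_lt hlt]
  omega

theorem pvBandRemNeg (m : Nat) (hm : m < 2 ^ 32) :
    PySem.Int.band ((2 : Int) ^ 32 * (-1) + (m : Int)) (Int.not 4294967295) = -4294967296 := by
  set f : Int := (2 : Int) ^ 32 * (-1) + (m : Int) with hf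
  have hnot : Int.not 4294967295 = -4294967296 := by decide
  have h32 : ((2 ^ 32 : Nat) : Int) = (2 : Int) ^ 32 := castPow 32
  have hfneg : ¬ (0 : Int) ≤ f := by omega
  rw [hnot]
  unfold PySem.Int.band
  rw [if_neg hfneg, if_neg (by norm_num : ¬ (0 : Int) ≤ -4294967296)]
  have htn : (-f - 1).toNat = 2 ^ 32 - m - 1 := by omega
  have h2 : (-(-4294967296 : Int) - 1).toNat = 4294967295 := by decide
  rw [htn, h2, pvOrMask (2 ^ 32 - m - 1) (by omega)]
  norm_num

-- ===== VERDICT (by name: the statement is the Claim_ definition above) =====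
theorem pretty_flags_spec : Claim_equal_pretty_flags := by
  intro flags hdom
  unfold Dom_pretty_flags pvDomInt at hdom
  rw [decide_eq_true_iff] at hdom
  unfold Spec_pretty_flags pretty_flags pretty_flags_alt
  simp only []
  have h32n : (2 : Nat) ^ 32 = 4294967296 := by norm_num
  have h32c : ((2 ^ 32 : Nat) : Int) = (2 : Int) ^ 32 := castPow 32
  rw [pvRangeEq]
  rcases le_or_gt 0 flags with hpos | hneg
  · -- nonnegative flags: high part 0
    have hf : flags = ((flags.toNat : Nat) : Int) := by omega
    set m : Nat := flags.toNat with hmdef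
    have hm : m < 2 ^ 32 := by omega
    rw [hf, pvBandLowNonneg m hm, pvBandRemNonneg m hm]
    have hB : prettyLoopB (((m : Nat) : Int).toNat + 1) ((m : Nat) : Int) []
        = (lowBits m).map (fun j => flagRepr (j + 0)) := by
      have h0 : ((m : Nat) : Int) = ((2 ^ 0 * m : Nat) : Int) := by norm_num
      rw [Int.toNat_natCast, h0, loopB_eq m 0 (m + 1) [] (by omega)]
      simp
    rw [hB]
    rw [(by push_cast; ring : ((m : Nat) : Int) = (2 : Int) ^ 32 * 0 + (2 : Int) ^ 0 * (m : Int)),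
      loopA_eq 32 0 m 0 [] (by omega) hm (Or.inl rfl)]
    by_cases hm0 : m = 0
    · rw [if_neg (by simp [hm0] : ¬ ((0 : Int) = 0 ∧ m ≠ 0))]
      rw [if_pos (Or.inr (by simp [hm0, lowBits_zero]))]
      simp [hm0, lowBits_zero]
    · rw [if_pos ⟨rfl, hm0⟩]
      rw [if_neg (by simp [List.map_eq_nil_iff, lowBits_eq_nil_iff, hm0])]
      simp
  · -- negative flags: high part -1
    have hf : flags = (2 : Int) ^ 32 * (-1) + (((flags + 4294967296).toNat : Nat) : Int) := by
      omega
    set m : Nat := (flags + 4294967296).toNat with hmdef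
    have hm : m < 2 ^ 32 := by omega
    rw [hf, pvBandLowNeg m hm, pvBandRemNeg m hm]
    have hB : prettyLoopB (((m : Nat) : Int).toNat + 1) ((m : Nat) : Int) []
        = (lowBits m).map (fun j => flagRepr (j + 0)) := by
      have h0 : ((m : Nat) : Int) = ((2 ^ 0 * m : Nat) : Int) := by norm_num
      rw [Int.toNat_natCast, h0, loopB_eq m 0 (m + 1) [] (by omega)]
      simp
    rw [hB]
    rw [(by ring : (2 : Int) ^ 32 * (-1) + ((m : Nat) : Int)
          = (2 : Int) ^ 32 * (-1) + (2 : Int) ^ 0 * (m : Int)),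
      loopA_eq 32 0 m (-1) [] (by omega) hm (Or.inr rfl)]
    rw [if_neg (by simp : ¬ ((-1 : Int) = 0 ∧ m ≠ 0))]
    rw [if_pos (Or.inl (by norm_num : (-4294967296 : Int) ≠ 0))]
    simp
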